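-- pv_equiv track=rewrite | github.com/SamuelBohumel/advent_of_code2025 | 09/main.py | get_bounds_x_y
-- ===== SOURCE A (Python) =====
-- def get_bounds_x_y(coords: list[list[int]]):
--     """
--     Return bounds for each row and column
--     """
--     #fill the shape - connect points
--     all_points = []
--     for i in range(0, len(coords)):
--         #add points -1 and all points from coords -1 up to current
--         all_points.append(coords[i-1])
--         if coords[i-1][0] == coords[i][0]:
--             range_x = range(1, abs(coords[i-1][1]-coords[i][1]))
--             for j in range_x:
--                 #check if we go left or right
--                 if coords[i-1][1] > coords[i][1]:
--                     all_points.append([coords[i][0], coords[i-1][1] - j])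
--                 else:
--                     all_points.append([coords[i][0], coords[i-1][1] + j])
--         if coords[i-1][1] == coords[i][1]:
--             range_y = range(1, abs(coords[i-1][0]-coords[i][0]))
--             for j in range_y:
--                 #check if we go up/dow
--                 if coords[i-1][0] > coords[i][0]:
--                     all_points.append([coords[i-1][0] - j, coords[i][1]])
--                 else:
--                     all_points.append([coords[i-1][0] + j, coords[i][1]])
--
--     bounds_x = {}
--     bounds_y = {}
--     for point in all_points:
--         if point[1] not in bounds_x.keys():
--             bounds_x[point[1]] = {}
--             bounds_x[point[1]]["min"] = point[0]
--             bounds_x[point[1]]["max"] = point[0]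
--         else:
--             if point[0] < bounds_x[point[1]]["min"]:
--                 bounds_x[point[1]]["min"] = point[0]
--             elif point[0] > bounds_x[point[1]]["max"]:
--                 bounds_x[point[1]]["max"] = point[0]
--         if point[0] not in bounds_y.keys():
--             bounds_y[point[0]] = {}
--             bounds_y[point[0]]["min"] = point[1]
--             bounds_y[point[0]]["max"] = point[1]
--         else:
--             if point[1] < bounds_y[point[0]]["min"]:
--                 bounds_y[point[0]]["min"] = point[1]
--             elif point[1] > bounds_y[point[0]]["max"]:
--                 bounds_y[point[0]]["max"] = point[1]
--
--     x_keys = list(bounds_x.keys())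
--     x_keys.sort()
--     sorted_x_keys = {i: bounds_x[i] for i in x_keys}
--     y_keys = list(bounds_y.keys())
--     y_keys.sort()
--     sorted_y_keys = {i: bounds_y[i] for i in y_keys}
--     return sorted_x_keys, sorted_y_keys
-- ===== SOURCE B (Python) =====
-- def get_bounds_x_y(coords: list[list[int]]):
--     """
--     Return bounds for each row and column
--     """
--     # Edge-by-edge: no intermediate point list; each edge's run along its own
--     # axis is merged in O(1) with interval endpoints, the cross-axis cells by a loop.
--     bounds_x = {}  # key: y (point[1]) -> [min_x, max_x]
--     bounds_y = {}  # key: x (point[0]) -> [min_y, max_y]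
--
--     def merge(d, k, lo, hi):
--         if k in d:
--             v = d[k]
--             if lo < v[0]:
--                 v[0] = lo
--             if hi > v[1]:
--                 v[1] = hi
--         else:
--             d[k] = [lo, hi]
--
--     for i in range(len(coords)):
--         px, py = coords[i - 1][0], coords[i - 1][1]
--         qx, qy = coords[i][0], coords[i][1]
--         # the starting corner of the edge
--         merge(bounds_x, py, px, px)
--         merge(bounds_y, px, py, py)
--         if px == qx:  # vertical run: interior cells strictly between py and qy
--             lo, hi = min(py, qy) + 1, max(py, qy) - 1
--             if lo <= hi:
--                 merge(bounds_y, px, lo, hi)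
--                 for y in range(lo, hi + 1):
--                     merge(bounds_x, y, px, px)
--         if py == qy:  # horizontal run
--             lo, hi = min(px, qx) + 1, max(px, qx) - 1
--             if lo <= hi:
--                 merge(bounds_x, py, lo, hi)
--                 for x in range(lo, hi + 1):
--                     merge(bounds_y, x, py, py)
--
--     def fmt(d):
--         return {k: {"min": d[k][0], "max": d[k][1]} for k in sorted(d)}
--
--     return fmt(bounds_x), fmt(bounds_y)
-- ===== Notes on version B (the rewrite author's own statement) =====
-- stated objective: alternative
-- what changed: B drops A's all_points list entirely and processes the polygon edge by edge: each edge's run along its own axis is merged into the bounds dict with one interval min/max step and its cross-axis cells with a loop, instead of A's materialising every covered point and reducing them one by one with an insert/elif scheme; the returned dicts are rendered directly from the sorted keys.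
import Mathlib
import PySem

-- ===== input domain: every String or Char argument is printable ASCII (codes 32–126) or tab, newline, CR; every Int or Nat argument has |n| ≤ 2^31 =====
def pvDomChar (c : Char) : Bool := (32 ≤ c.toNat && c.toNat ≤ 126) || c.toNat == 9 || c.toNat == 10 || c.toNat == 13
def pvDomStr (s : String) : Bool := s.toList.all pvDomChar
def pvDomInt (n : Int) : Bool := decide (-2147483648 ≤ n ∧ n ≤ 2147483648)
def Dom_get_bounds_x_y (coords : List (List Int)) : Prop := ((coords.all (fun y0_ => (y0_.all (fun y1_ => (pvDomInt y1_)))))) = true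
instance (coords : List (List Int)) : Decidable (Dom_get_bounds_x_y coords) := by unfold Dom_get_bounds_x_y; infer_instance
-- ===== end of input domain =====

-- B processes the polygon edge by edge, merging each edge's run along its own axis in one
-- interval step instead of materialising every covered point in a list (objective: alternative).

-- ===== PORT A =====
-- fresh inner dict {"min": v, "max": v}
def pvNewEntry (v : Int) : PySem.Dict String Int :=
  (PySem.Dict.empty.insert "min" v).insert "max" v

-- one step of A's bounds loop for one of the two dicts (key k, candidate value v)
def pvAStep (d : PySem.Dict Int (PySem.Dict String Int)) (k v : Int) :
    PySem.Dict Int (PySem.Dict String Int) :=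
  if d.contains k = false then
    d.insert k (pvNewEntry v)
  else
    let inner := d.getD k PySem.Dict.empty
    if v < inner.getD "min" 0 then d.insert k (inner.insert "min" v)
    else if v > inner.getD "max" 0 then d.insert k (inner.insert "max" v)
    else d

-- A's first loop building all_points (indexing via pyGetD; defaults unreachable under Pre_)
def pvAllPoints (coords : List (List Int)) : List (List Int) :=
  (PySem.List.pyRange 0 (coords.length : Int) 1).foldl (fun acc i =>
    let p := PySem.List.pyGetD coords (i - 1) []
    let q := PySem.List.pyGetD coords i []
    let acc := acc ++ [p]
    let acc :=
      if PySem.List.pyGetD p 0 0 = PySem.List.pyGetD q 0 0 then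
        (PySem.List.pyRange 1 ((PySem.List.pyGetD p 1 0 - PySem.List.pyGetD q 1 0).natAbs : Int) 1).foldl
          (fun acc j =>
            if PySem.List.pyGetD p 1 0 > PySem.List.pyGetD q 1 0 then
              acc ++ [[PySem.List.pyGetD q 0 0, PySem.List.pyGetD p 1 0 - j]]
            else
              acc ++ [[PySem.List.pyGetD q 0 0, PySem.List.pyGetD p 1 0 + j]]) acc
      else acc
    if PySem.List.pyGetD p 1 0 = PySem.List.pyGetD q 1 0 then
      (PySem.List.pyRange 1 ((PySem.List.pyGetD p 0 0 - PySem.List.pyGetD q 0 0).natAbs : Int) 1).foldl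
        (fun acc j =>
          if PySem.List.pyGetD p 0 0 > PySem.List.pyGetD q 0 0 then
            acc ++ [[PySem.List.pyGetD p 0 0 - j, PySem.List.pyGetD q 1 0]]
          else
            acc ++ [[PySem.List.pyGetD p 0 0 + j, PySem.List.pyGetD q 1 0]]) acc
    else acc) []

def get_bounds_x_y (coords : List (List Int)) :
    (List (Int × List (String × Int))) × (List (Int × List (String × Int))) :=
  let all_points := pvAllPoints coords
  let bounds :=
    all_points.foldl (fun (bd : PySem.Dict Int (PySem.Dict String Int) × PySem.Dict Int (PySem.Dict String Int)) point =>
      (pvAStep bd.1 (PySem.List.pyGetD point 1 0) (PySem.List.pyGetD point 0 0),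
       pvAStep bd.2 (PySem.List.pyGetD point 0 0) (PySem.List.pyGetD point 1 0)))
      (PySem.Dict.empty, PySem.Dict.empty)
  let x_keys := PySem.List.sorted bounds.1.keys (fun k => k) false
  let y_keys := PySem.List.sorted bounds.2.keys (fun k => k) false
  (x_keys.map (fun k => (k, (bounds.1.getD k PySem.Dict.empty).items)),
   y_keys.map (fun k => (k, (bounds.2.getD k PySem.Dict.empty).items)))

-- ===== PORT B =====
-- Source B's merge(d, k, lo, hi)
def pvMerge (d : PySem.Dict Int (List Int)) (k lo hi : Int) : PySem.Dict Int (List Int) :=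
  if d.contains k then
    let v := d.getD k []
    let v := if lo < PySem.List.pyGetD v 0 0 then PySem.List.pySetD v 0 lo else v
    let v := if hi > PySem.List.pyGetD v 1 0 then PySem.List.pySetD v 1 hi else v
    d.insert k v
  else d.insert k [lo, hi]

-- Source B's loop body for edge i (bd = (bounds_x, bounds_y))
def pvBStep (coords : List (List Int)) (bd : PySem.Dict Int (List Int) × PySem.Dict Int (List Int))
    (i : Int) : PySem.Dict Int (List Int) × PySem.Dict Int (List Int) :=
  let px := PySem.List.pyGetD (PySem.List.pyGetD coords (i - 1) []) 0 0
  let py := PySem.List.pyGetD (PySem.List.pyGetD coords (i - 1) []) 1 0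
  let qx := PySem.List.pyGetD (PySem.List.pyGetD coords i []) 0 0
  let qy := PySem.List.pyGetD (PySem.List.pyGetD coords i []) 1 0
  let bd := (pvMerge bd.1 py px px, pvMerge bd.2 px py py)
  let bd :=
    if px = qx then
      let lo := min py qy + 1
      let hi := max py qy - 1
      if lo ≤ hi then
        ((PySem.List.pyRange lo (hi + 1) 1).foldl (fun d y => pvMerge d y px px) bd.1,
         pvMerge bd.2 px lo hi)
      else bd
    else bd
  if py = qy then
    let lo := min px qx + 1
    let hi := max px qx - 1
    if lo ≤ hi then
      (pvMerge bd.1 py lo hi,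
       (PySem.List.pyRange lo (hi + 1) 1).foldl (fun d x => pvMerge d x py py) bd.2)
    else bd
  else bd

-- Source B's fmt(d)
def pvFmt (d : PySem.Dict Int (List Int)) : List (Int × List (String × Int)) :=
  (PySem.List.sorted d.keys (fun k => k) false).map (fun k =>
    (k, [("min", PySem.List.pyGetD (d.getD k []) 0 0), ("max", PySem.List.pyGetD (d.getD k []) 1 0)]))

def get_bounds_x_y_alt (coords : List (List Int)) :
    (List (Int × List (String × Int))) × (List (Int × List (String × Int))) :=
  let bounds :=
    (PySem.List.pyRange 0 (coords.length : Int) 1).foldl (pvBStep coords)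
      (PySem.Dict.empty, PySem.Dict.empty)
  (pvFmt bounds.1, pvFmt bounds.2)

-- ===== PRECONDITION & SPEC =====
-- Pre_ excludes inputs where some coordinate has fewer than two components: there Python A
-- (and Python B) raise IndexError reading point[0]/point[1].
def Pre_get_bounds_x_y (coords : List (List Int)) : Prop := ∀ p ∈ coords, 2 ≤ p.length
instance (coords : List (List Int)) : Decidable (Pre_get_bounds_x_y coords) := by
  unfold Pre_get_bounds_x_y; infer_instance

def pvWitness_get_bounds_x_y : List (List Int) := [[0, 0], [0, 3], [2, 3], [2, 0]]

def Spec_get_bounds_x_y (coords : List (List Int))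
    (out : (List (Int × List (String × Int))) × (List (Int × List (String × Int)))) : Prop :=
  out = get_bounds_x_y_alt coords
instance (coords : List (List Int)) (out : (List (Int × List (String × Int))) × (List (Int × List (String × Int)))) : Decidable (Spec_get_bounds_x_y coords out) := by
  unfold Spec_get_bounds_x_y; infer_instance

-- ===== CLAIM (what is proved, stated in full; the proofs are below) =====
def Claim_equal_get_bounds_x_y : Prop := ∀ (coords : List (List Int)), Dom_get_bounds_x_y coords → Pre_get_bounds_x_y coords → Spec_get_bounds_x_y coords (get_bounds_x_y coords)

-- ===== LEMMAS AND PROOFS =====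

-- abstract per-key state: key ↦ none (unseen) or some (min, max)
def pvUpd (s : Int → Option (Int × Int)) (k v : Int) : Int → Option (Int × Int) :=
  fun k' => if k' = k then some ((s k).elim (v, v) (fun p => (min p.1 v, max p.2 v))) else s k'

def pvUpdI (s : Int → Option (Int × Int)) (k lo hi : Int) : Int → Option (Int × Int) :=
  fun k' => if k' = k then some ((s k).elim (lo, hi) (fun p => (min p.1 lo, max p.2 hi))) else s k'

def pvGood (s : Int → Option (Int × Int)) : Prop := ∀ k p, s k = some p → p.1 ≤ p.2

def pvRelA (d : PySem.Dict Int (PySem.Dict String Int)) (s : Int → Option (Int × Int)) : Prop :=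
  d.keys.Nodup ∧ ∀ k, d.get? k = (s k).map (fun p => PySem.Dict.mk [("min", p.1), ("max", p.2)])

def pvRelB (d : PySem.Dict Int (List Int)) (s : Int → Option (Int × Int)) : Prop :=
  d.keys.Nodup ∧ ∀ k, d.get? k = (s k).map (fun p => [p.1, p.2])

-- edge-corner accessors
def pvPx (coords : List (List Int)) (i : Int) : Int :=
  PySem.List.pyGetD (PySem.List.pyGetD coords (i - 1) []) 0 0
def pvPy (coords : List (List Int)) (i : Int) : Int :=
  PySem.List.pyGetD (PySem.List.pyGetD coords (i - 1) []) 1 0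
def pvQx (coords : List (List Int)) (i : Int) : Int :=
  PySem.List.pyGetD (PySem.List.pyGetD coords i []) 0 0
def pvQy (coords : List (List Int)) (i : Int) : Int :=
  PySem.List.pyGetD (PySem.List.pyGetD coords i []) 1 0

-- the (x, y) pairs A's iteration i contributes to all_points
def pvSegPts (coords : List (List Int)) (i : Int) : List (Int × Int) :=
  (pvPx coords i, pvPy coords i) ::
  ((if pvPx coords i = pvQx coords i then
      (PySem.List.pyRange 1 ((pvPy coords i - pvQy coords i).natAbs : Int) 1).map (fun j =>
        (pvQx coords i, if pvPy coords i > pvQy coords i then pvPy coords i - j else pvPy coords i + j))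
    else []) ++
   (if pvPy coords i = pvQy coords i then
      (PySem.List.pyRange 1 ((pvPx coords i - pvQx coords i).natAbs : Int) 1).map (fun j =>
        ((if pvPx coords i > pvQx coords i then pvPx coords i - j else pvPx coords i + j), pvQy coords i))
    else []))

-- abstract effect of edge i on the x-dict state / y-dict state (mirrors pvBStep)
def pvEdgeX (coords : List (List Int)) (i : Int) (s : Int → Option (Int × Int)) : Int → Option (Int × Int) :=
  let px := pvPx coords i; let py := pvPy coords i
  let qx := pvQx coords i; let qy := pvQy coords i
  let s := pvUpd s py px
  let s :=
    if px = qx then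
      if min py qy + 1 ≤ max py qy - 1 then
        (PySem.List.pyRange (min py qy + 1) (max py qy - 1 + 1) 1).foldl (fun s y => pvUpd s y px) s
      else s
    else s
  if py = qy then
    if min px qx + 1 ≤ max px qx - 1 then pvUpdI s py (min px qx + 1) (max px qx - 1) else s
  else s

def pvEdgeY (coords : List (List Int)) (i : Int) (s : Int → Option (Int × Int)) : Int → Option (Int × Int) :=
  let px := pvPx coords i; let py := pvPy coords i
  let qx := pvQx coords i; let qy := pvQy coords i
  let s := pvUpd s px py
  let s :=
    if px = qx then
      if min py qy + 1 ≤ max py qy - 1 then pvUpdI s px (min py qy + 1) (max py qy - 1) else s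
    else s
  if py = qy then
    if min px qx + 1 ≤ max px qx - 1 then
      (PySem.List.pyRange (min px qx + 1) (max px qx - 1 + 1) 1).foldl (fun s x => pvUpd s x py) s
    else s
  else s

-- B's per-edge dict-level effects (components of pvBStep)
def pvBX (coords : List (List Int)) (i : Int) (d : PySem.Dict Int (List Int)) : PySem.Dict Int (List Int) :=
  let px := pvPx coords i; let py := pvPy coords i
  let qx := pvQx coords i; let qy := pvQy coords i
  let d := pvMerge d py px px
  let d :=
    if px = qx then
      if min py qy + 1 ≤ max py qy - 1 then
        (PySem.List.pyRange (min py qy + 1) (max py qy - 1 + 1) 1).foldl (fun d y => pvMerge d y px px) d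
      else d
    else d
  if py = qy then
    if min px qx + 1 ≤ max px qx - 1 then pvMerge d py (min px qx + 1) (max px qx - 1) else d
  else d

def pvBY (coords : List (List Int)) (i : Int) (d : PySem.Dict Int (List Int)) : PySem.Dict Int (List Int) :=
  let px := pvPx coords i; let py := pvPy coords i
  let qx := pvQx coords i; let qy := pvQy coords i
  let d := pvMerge d px py py
  let d :=
    if px = qx then
      if min py qy + 1 ≤ max py qy - 1 then pvMerge d px (min py qy + 1) (max py qy - 1) else d
    else d
  if py = qy then
    if min px qx + 1 ≤ max px qx - 1 then
      (PySem.List.pyRange (min px qx + 1) (max px qx - 1 + 1) 1).foldl (fun d x => pvMerge d x py py) d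
    else d
  else d

theorem pvBStep_eq (coords : List (List Int)) (bd : PySem.Dict Int (List Int) × PySem.Dict Int (List Int)) (i : Int) :
    pvBStep coords bd i = (pvBX coords i bd.1, pvBY coords i bd.2) := by
  simp only [pvBStep, pvBX, pvBY, pvPx, pvPy, pvQx, pvQy]
  split_ifs <;> rfl

theorem pvFoldl_prod {α β γ : Type} (l : List γ) (f : α → γ → α) (g : β → γ → β) (a : α) (b : β) :
    l.foldl (fun t c => (f t.1 c, g t.2 c)) (a, b) = (l.foldl f a, l.foldl g b) := by
  induction l generalizing a b with
  | nil => rfl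
  | cons x xs ih => simp only [List.foldl_cons]; exact ih (f a x) (g b x)

-- goodness
theorem pvGood_upd (s : Int → Option (Int × Int)) (k v : Int) (h : pvGood s) : pvGood (pvUpd s k v) := by
  intro k' p hp
  unfold pvUpd at hp
  split at hp
  · cases hsk : s k with
    | none => rw [hsk] at hp; simp at hp; subst hp; simp
    | some q => rw [hsk] at hp; have := h k q hsk; simp at hp; subst hp; simp only []; omega
  · exact h k' p hp


theorem pvGood_updI (s : Int → Option (Int × Int)) (k lo hi : Int) (hlo : lo ≤ hi) (h : pvGood s) :
    pvGood (pvUpdI s k lo hi) := by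
  intro k' p hp
  unfold pvUpdI at hp
  split at hp
  · cases hsk : s k with
    | none => rw [hsk] at hp; simp at hp; subst hp; simpa
    | some q => rw [hsk] at hp; have := h k q hsk; simp at hp; subst hp; simp; omega
  · exact h k' p hp


theorem pvUpdI_self (s : Int → Option (Int × Int)) (k v : Int) : pvUpdI s k v v = pvUpd s k v := rfl


-- fold of single-point updates with one fixed key over an ascending run collapses to one interval update
theorem pvUpd_updI_top (s : Int → Option (Int × Int)) (k lo hi : Int) (h : lo ≤ hi + 1) :
    pvUpd (pvUpdI s k lo hi) k (hi + 1) = pvUpdI s k lo (hi + 1) := by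
  funext j
  by_cases hj : j = k
  · simp only [pvUpd, pvUpdI, hj, if_pos rfl]
    cases s k <;> simp <;> first | omega | (constructor <;> omega)
  · simp only [pvUpd, pvUpdI, if_neg hj]

theorem pvFold_upd_asc (k lo hi : Int) (hlo : lo ≤ hi) (s : Int → Option (Int × Int)) :
    (PySem.List.pyRange lo (hi + 1) 1).foldl (fun s v => pvUpd s k v) s = pvUpdI s k lo hi := by
  obtain ⟨m, rfl⟩ : ∃ m : Nat, hi = lo + m := ⟨(hi - lo).toNat, by omega⟩
  clear hlo
  induction m with
  | zero =>
    rw [show lo + ((0:Nat):Int) + 1 = lo + 1 by push_cast; ring]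
    rw [PySem.List.pyRange_one_singleton]
    rw [show lo + ((0:Nat):Int) = lo by push_cast; ring]
    exact (pvUpdI_self s k lo).symm ▸ rfl
  | succ n ih =>
    rw [show lo + ((n+1:Nat):Int) = (lo + (n:Nat)) + 1 by push_cast; ring]
    rw [PySem.List.pyRange_one_succ_right (by push_cast; omega), List.foldl_append, ih]
    simpa using pvUpd_updI_top s k lo (lo + (n:Nat)) (by push_cast; omega)


-- pvUpd is fully right-commutative (for Perm.foldl_eq)
theorem pvUpd_comm (s : Int → Option (Int × Int)) (k a k' b : Int) :
    pvUpd (pvUpd s k a) k' b = pvUpd (pvUpd s k' b) k a := by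
  funext j
  by_cases h3 : k = k'
  · subst h3
    by_cases hj : j = k
    · simp only [pvUpd, hj, if_pos rfl]
      cases s k <;> simp <;> constructor <;> omega
    · simp only [pvUpd, if_neg hj]
  · by_cases h1 : j = k <;> by_cases h2 : j = k' <;>
      simp_all [pvUpd]


theorem pvPerm_desc (b m : Int) :
    ((PySem.List.pyRange 1 m 1).map (fun j => b - j)).Perm (PySem.List.pyRange (b - m + 1) b 1) := by
  rw [List.perm_ext_iff_of_nodup
    (List.Nodup.map (fun x y h => by omega) (PySem.List.nodup_pyRange_one 1 m))
    (PySem.List.nodup_pyRange_one _ _)]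
  intro a
  simp only [List.mem_map, PySem.List.mem_pyRange_one]
  constructor
  · rintro ⟨j, hj, rfl⟩; omega
  · intro h; exact ⟨b - a, by omega, by omega⟩

theorem pvPerm_asc (b m : Int) :
    ((PySem.List.pyRange 1 m 1).map (fun j => b + j)).Perm (PySem.List.pyRange (b + 1) (b + m) 1) := by
  rw [List.perm_ext_iff_of_nodup
    (List.Nodup.map (fun x y h => by omega) (PySem.List.nodup_pyRange_one 1 m))
    (PySem.List.nodup_pyRange_one _ _)]
  intro a
  simp only [List.mem_map, PySem.List.mem_pyRange_one]
  constructor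
  · rintro ⟨j, hj, rfl⟩; omega
  · intro h; exact ⟨a - b, by omega, by omega⟩

-- a directional run of single-point updates with a CONSTANT value v over varying keys

theorem pvKeys_collapse (v b c : Int) (s : Int → Option (Int × Int)) :
    ((PySem.List.pyRange 1 (((b - c).natAbs : Int)) 1).map (fun j => if b > c then b - j else b + j)).foldl
        (fun s y => pvUpd s y v) s =
      if min b c + 1 ≤ max b c - 1 then
        (PySem.List.pyRange (min b c + 1) (max b c - 1 + 1) 1).foldl (fun s y => pvUpd s y v) s
      else s := by
  haveI : RightCommutative (fun (s : Int → Option (Int × Int)) y => pvUpd s y v) :=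
    ⟨fun s a b => pvUpd_comm s a v b v⟩
  by_cases hm : min b c + 1 ≤ max b c - 1
  · rw [if_pos hm]
    by_cases hd : b > c
    · simp only [if_pos hd]
      refine List.Perm.foldl_eq ?_ s
      have := pvPerm_desc b ((b - c).natAbs : Int)
      rw [show b - ((b - c).natAbs : Int) + 1 = c + 1 by omega] at this
      rw [show min b c + 1 = c + 1 by omega, show max b c - 1 + 1 = b by omega]
      exact this
    · simp only [if_neg hd]
      refine List.Perm.foldl_eq ?_ s
      have := pvPerm_asc b ((b - c).natAbs : Int)
      rw [show b + ((b - c).natAbs : Int) = c by omega] at this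
      rw [show min b c + 1 = b + 1 by omega, show max b c - 1 + 1 = c by omega]
      exact this
  · rw [if_neg hm]
    rw [PySem.List.pyRange_one_eq_nil (by omega)]
    rfl

-- a directional run of single-point updates with a CONSTANT key k over varying values

theorem pvVals_collapse (k b c : Int) (s : Int → Option (Int × Int)) :
    ((PySem.List.pyRange 1 (((b - c).natAbs : Int)) 1).map (fun j => if b > c then b - j else b + j)).foldl
        (fun s x => pvUpd s k x) s =
      if min b c + 1 ≤ max b c - 1 then pvUpdI s k (min b c + 1) (max b c - 1) else s := by
  haveI : RightCommutative (fun (s : Int → Option (Int × Int)) x => pvUpd s k x) :=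
    ⟨fun s a b => pvUpd_comm s k a k b⟩
  by_cases hm : min b c + 1 ≤ max b c - 1
  · rw [if_pos hm, ← pvFold_upd_asc k _ _ (by omega) s]
    by_cases hd : b > c
    · simp only [if_pos hd]
      refine List.Perm.foldl_eq ?_ s
      have := pvPerm_desc b ((b - c).natAbs : Int)
      rw [show b - ((b - c).natAbs : Int) + 1 = c + 1 by omega] at this
      rw [show min b c + 1 = c + 1 by omega, show max b c - 1 + 1 = b by omega]
      exact this
    · simp only [if_neg hd]
      refine List.Perm.foldl_eq ?_ s
      have := pvPerm_asc b ((b - c).natAbs : Int)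
      rw [show b + ((b - c).natAbs : Int) = c by omega] at this
      rw [show min b c + 1 = b + 1 by omega, show max b c - 1 + 1 = c by omega]
      exact this
  · rw [if_neg hm]
    rw [PySem.List.pyRange_one_eq_nil (by omega)]
    rfl

theorem pvSome_of_contains {ν : Type} (d : PySem.Dict Int ν) {s : Int → Option (Int × Int)}
    {f : Int × Int → ν} (hget : ∀ k, d.get? k = (s k).map f) {k : Int}
    (hc : d.contains k = true) : ∃ m M, s k = some (m, M) := by
  have hsome : (d.get? k).isSome := by rw [← PySem.Dict.contains_eq_isSome_get?]; exact hc
  rw [hget k] at hsome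
  cases hsk : s k with
  | none => rw [hsk] at hsome; simp at hsome
  | some p => exact ⟨p.1, p.2, by simp [hsk]⟩

-- A-side step simulation
theorem pvAStep_sim (d : PySem.Dict Int (PySem.Dict String Int)) (s : Int → Option (Int × Int))
    (k v : Int) (hg : pvGood s) (hr : pvRelA d s) : pvRelA (pvAStep d k v) (pvUpd s k v) := by
  obtain ⟨hnd, hget⟩ := hr
  have hupd_ne : ∀ k', k' ≠ k → pvUpd s k v k' = s k' := fun k' hk' => if_neg hk'
  by_cases hc : d.contains k = false
  · have hk : s k = none := by
      have h0 : d.get? k = none := (PySem.Dict.get?_eq_none_iff_contains d k).mpr hc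
      rw [hget k] at h0
      exact Option.map_eq_none_iff.mp h0
    rw [pvAStep, if_pos hc]
    refine ⟨PySem.Dict.nodup_keys_insert d k (pvNewEntry v) hnd, fun k' => ?_⟩
    rw [PySem.Dict.get?_insert]
    by_cases hk' : k' = k
    · subst hk'
      rw [if_pos rfl, pvUpd, if_pos rfl, hk]
      rfl
    · rw [if_neg hk', hget k', hupd_ne k' hk']
  · have hc' : d.contains k = true := by simpa using hc
    obtain ⟨m, M, hk⟩ := pvSome_of_contains d hget hc'
    have hmM : m ≤ M := hg k (m, M) hk
    have hinner : d.getD k PySem.Dict.empty = PySem.Dict.mk [("min", m), ("max", M)] := by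
      rw [PySem.Dict.getD_eq_get?_getD, hget k, hk]; rfl
    have hval : pvUpd s k v k = some (min m v, max M v) := by
      rw [pvUpd, if_pos rfl, hk]; rfl
    rw [pvAStep, if_neg hc]
    simp only [hinner]
    have hmin : (PySem.Dict.mk [("min", m), ("max", M)]).getD "min" 0 = m := rfl
    have hmax : (PySem.Dict.mk [("min", m), ("max", M)]).getD "max" 0 = M := rfl
    rw [hmin, hmax]
    by_cases h1 : v < m
    · rw [if_pos h1]
      refine ⟨PySem.Dict.nodup_keys_insert _ _ _ hnd, fun k' => ?_⟩
      rw [PySem.Dict.get?_insert]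
      by_cases hk' : k' = k
      · subst hk'
        rw [if_pos rfl, hval]
        have e : (PySem.Dict.mk [("min", m), ("max", M)]).insert "min" v = PySem.Dict.mk [("min", v), ("max", M)] := rfl
        rw [e, show min m v = v by omega, show max M v = M by omega]
        rfl
      · rw [if_neg hk', hget k', hupd_ne k' hk']
    · rw [if_neg h1]
      by_cases h2 : v > M
      · rw [if_pos h2]
        refine ⟨PySem.Dict.nodup_keys_insert _ _ _ hnd, fun k' => ?_⟩
        rw [PySem.Dict.get?_insert]
        by_cases hk' : k' = k
        · subst hk'
          rw [if_pos rfl, hval]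
          have e : (PySem.Dict.mk [("min", m), ("max", M)]).insert "max" v = PySem.Dict.mk [("min", m), ("max", v)] := rfl
          rw [e, show min m v = m by omega, show max M v = v by omega]
          rfl
        · rw [if_neg hk', hget k', hupd_ne k' hk']
      · rw [if_neg h2]
        refine ⟨hnd, fun k' => ?_⟩
        by_cases hk' : k' = k
        · rw [hk']
          rw [hget k, hk, hval, show min m v = m by omega, show max M v = M by omega]
        · rw [hget k', hupd_ne k' hk']


-- B-side merge simulation
theorem pvMerge_sim (d : PySem.Dict Int (List Int)) (s : Int → Option (Int × Int))
    (k lo hi : Int) (hlo : lo ≤ hi) (hg : pvGood s) (hr : pvRelB d s) :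
    pvRelB (pvMerge d k lo hi) (pvUpdI s k lo hi) := by
  obtain ⟨hnd, hget⟩ := hr
  have hupd_ne : ∀ k', k' ≠ k → pvUpdI s k lo hi k' = s k' := fun k' hk' => if_neg hk'
  by_cases hc : d.contains k = true
  · obtain ⟨m, M, hk⟩ := pvSome_of_contains d hget hc
    have hmM : m ≤ M := hg k (m, M) hk
    have hinner : d.getD k [] = [m, M] := by
      rw [PySem.Dict.getD_eq_get?_getD, hget k, hk]; rfl
    have hval : pvUpdI s k lo hi k = some (min m lo, max M hi) := by
      rw [pvUpdI, if_pos rfl, hk]; rfl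
    rw [pvMerge, if_pos hc]
    simp only [hinner]
    have hv : (if hi > PySem.List.pyGetD
          (if lo < PySem.List.pyGetD [m, M] 0 0 then PySem.List.pySetD [m, M] 0 lo else [m, M]) 1 0
        then PySem.List.pySetD
          (if lo < PySem.List.pyGetD [m, M] 0 0 then PySem.List.pySetD [m, M] 0 lo else [m, M]) 1 hi
        else (if lo < PySem.List.pyGetD [m, M] 0 0 then PySem.List.pySetD [m, M] 0 lo else [m, M]))
        = [min m lo, max M hi] := by
      rw [show PySem.List.pyGetD [m, M] 0 0 = m from rfl]
      by_cases e1 : lo < m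
      · rw [if_pos e1, show PySem.List.pySetD [m, M] 0 lo = [lo, M] from rfl,
            show PySem.List.pyGetD [lo, M] 1 0 = M from rfl]
        by_cases e2 : hi > M
        · rw [if_pos e2, show PySem.List.pySetD [lo, M] 1 hi = [lo, hi] from rfl,
              show min m lo = lo by omega, show max M hi = hi by omega]
        · rw [if_neg e2, show min m lo = lo by omega, show max M hi = M by omega]
      · rw [if_neg e1, show PySem.List.pyGetD [m, M] 1 0 = M from rfl]
        by_cases e2 : hi > M
        · rw [if_pos e2, show PySem.List.pySetD [m, M] 1 hi = [m, hi] from rfl,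
              show min m lo = m by omega, show max M hi = hi by omega]
        · rw [if_neg e2, show min m lo = m by omega, show max M hi = M by omega]
    rw [hv]
    refine ⟨PySem.Dict.nodup_keys_insert _ _ _ hnd, fun k' => ?_⟩
    rw [PySem.Dict.get?_insert]
    by_cases hk' : k' = k
    · rw [hk', if_pos rfl, hval]; rfl
    · rw [if_neg hk', hget k', hupd_ne k' hk']
  · have hcf : d.contains k = false := by simpa using hc
    have hk : s k = none := by
      have h0 : d.get? k = none := (PySem.Dict.get?_eq_none_iff_contains d k).mpr hcf
      rw [hget k] at h0
      exact Option.map_eq_none_iff.mp h0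
    rw [pvMerge, if_neg hc]
    refine ⟨PySem.Dict.nodup_keys_insert _ _ _ hnd, fun k' => ?_⟩
    rw [PySem.Dict.get?_insert]
    by_cases hk' : k' = k
    · rw [hk', if_pos rfl, pvUpdI, if_pos rfl, hk]; rfl
    · rw [if_neg hk', hget k', hupd_ne k' hk']


-- generic fold lifting of a simulation
theorem pvRel_foldl {δ σ γ : Type} (R : δ → σ → Prop)
    (F : δ → γ → δ) (G : σ → γ → σ)
    (hstep : ∀ d s x, R d s → R (F d x) (G s x)) :
    ∀ (l : List γ) (d : δ) (s : σ), R d s → R (l.foldl F d) (l.foldl G s) := by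
  intro l
  induction l with
  | nil => intro d s hr; exact hr
  | cons x xs ih => intro d s hr; exact ih (F d x) (G s x) (hstep d s x hr)


-- A's abstract per-edge fold equals B's abstract edge effect
theorem pvSeg_edgeX (coords : List (List Int)) (i : Int) (s : Int → Option (Int × Int)) :
    (pvSegPts coords i).foldl (fun s p => pvUpd s p.2 p.1) s = pvEdgeX coords i s := by
  unfold pvSegPts pvEdgeX
  generalize pvPx coords i = px
  generalize pvPy coords i = py
  generalize pvQx coords i = qx
  generalize pvQy coords i = qy
  simp only [List.foldl_cons, List.foldl_append]
  generalize pvUpd s py px = s1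
  have hV : (if px = qx then
        (PySem.List.pyRange 1 ((py - qy).natAbs : Int) 1).map (fun j =>
          (qx, if py > qy then py - j else py + j))
      else []).foldl (fun s p => pvUpd s p.2 p.1) s1 =
      (if px = qx then
        if min py qy + 1 ≤ max py qy - 1 then
          (PySem.List.pyRange (min py qy + 1) (max py qy - 1 + 1) 1).foldl (fun s y => pvUpd s y px) s1
        else s1
      else s1) := by
    by_cases hv : px = qx
    · subst hv
      simp only [eq_self_iff_true, if_true]
      rw [List.foldl_map]
      have := pvKeys_collapse px py qy s1
      rw [List.foldl_map] at this
      exact this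
    · simp only [if_neg hv]
      rfl
  rw [hV]
  generalize (if px = qx then
      if min py qy + 1 ≤ max py qy - 1 then
        (PySem.List.pyRange (min py qy + 1) (max py qy - 1 + 1) 1).foldl (fun s y => pvUpd s y px) s1
      else s1
    else s1) = s2
  by_cases hh : py = qy
  · subst hh
    simp only [eq_self_iff_true, if_true]
    rw [List.foldl_map]
    have := pvVals_collapse py px qx s2
    rw [List.foldl_map] at this
    exact this
  · simp only [if_neg hh]
    rfl

theorem pvSeg_edgeY (coords : List (List Int)) (i : Int) (s : Int → Option (Int × Int)) :
    (pvSegPts coords i).foldl (fun s p => pvUpd s p.1 p.2) s = pvEdgeY coords i s := by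
  unfold pvSegPts pvEdgeY
  generalize pvPx coords i = px
  generalize pvPy coords i = py
  generalize pvQx coords i = qx
  generalize pvQy coords i = qy
  simp only [List.foldl_cons, List.foldl_append]
  generalize pvUpd s px py = s1
  have hV : (if px = qx then
        (PySem.List.pyRange 1 ((py - qy).natAbs : Int) 1).map (fun j =>
          (qx, if py > qy then py - j else py + j))
      else []).foldl (fun s p => pvUpd s p.1 p.2) s1 =
      (if px = qx then
        if min py qy + 1 ≤ max py qy - 1 then pvUpdI s1 px (min py qy + 1) (max py qy - 1) else s1
      else s1) := by
    by_cases hv : px = qx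
    · subst hv
      simp only [eq_self_iff_true, if_true]
      rw [List.foldl_map]
      have := pvVals_collapse px py qy s1
      rw [List.foldl_map] at this
      exact this
    · simp only [if_neg hv]
      rfl
  rw [hV]
  generalize (if px = qx then
      if min py qy + 1 ≤ max py qy - 1 then pvUpdI s1 px (min py qy + 1) (max py qy - 1) else s1
    else s1) = s2
  by_cases hh : py = qy
  · subst hh
    simp only [eq_self_iff_true, if_true]
    rw [List.foldl_map]
    have := pvKeys_collapse py px qx s2
    rw [List.foldl_map] at this
    exact this
  · simp only [if_neg hh]
    rfl


-- per-edge simulation of B's dict-level effects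
theorem pvBX_sim (coords : List (List Int)) (i : Int) (d : PySem.Dict Int (List Int))
    (s : Int → Option (Int × Int)) (h : pvGood s ∧ pvRelB d s) :
    pvGood (pvEdgeX coords i s) ∧ pvRelB (pvBX coords i d) (pvEdgeX coords i s) := by
  simp only [pvBX, pvEdgeX]
  generalize pvPx coords i = px
  generalize pvPy coords i = py
  generalize pvQx coords i = qx
  generalize pvQy coords i = qy
  have h1 : pvGood (pvUpd s py px) ∧ pvRelB (pvMerge d py px px) (pvUpd s py px) :=
    ⟨pvGood_upd s py px h.1, pvUpdI_self s py px ▸ pvMerge_sim d s py px px le_rfl h.1 h.2⟩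
  generalize hgen1 : pvUpd s py px = s1 at h1
  generalize hgen2 : pvMerge d py px px = d1 at h1
  by_cases hv : px = qx
  · simp only [if_pos hv]
    by_cases hm : min py qy + 1 ≤ max py qy - 1
    · simp only [if_pos hm]
      have h2 := pvRel_foldl (fun d s => pvGood s ∧ pvRelB d s)
        (fun d y => pvMerge d y px px) (fun s y => pvUpd s y px)
        (fun d s y hh => ⟨pvGood_upd s y px hh.1, pvMerge_sim d s y px px le_rfl hh.1 hh.2⟩)
        (PySem.List.pyRange (min py qy + 1) (max py qy - 1 + 1) 1) d1 s1 h1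
      generalize hgen3 : (PySem.List.pyRange (min py qy + 1) (max py qy - 1 + 1) 1).foldl (fun s y => pvUpd s y px) s1 = s2 at h2
      generalize hgen4 : (PySem.List.pyRange (min py qy + 1) (max py qy - 1 + 1) 1).foldl (fun d y => pvMerge d y px px) d1 = d2 at h2
      by_cases hh : py = qy
      · simp only [if_pos hh]
        by_cases hm2 : min px qx + 1 ≤ max px qx - 1
        · simp only [if_pos hm2]
          exact ⟨pvGood_updI s2 py _ _ hm2 h2.1, pvMerge_sim d2 s2 py _ _ hm2 h2.1 h2.2⟩
        · simp only [if_neg hm2]; exact h2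
      · simp only [if_neg hh]; exact h2
    · simp only [if_neg hm]
      by_cases hh : py = qy
      · simp only [if_pos hh]
        by_cases hm2 : min px qx + 1 ≤ max px qx - 1
        · simp only [if_pos hm2]
          exact ⟨pvGood_updI s1 py _ _ hm2 h1.1, pvMerge_sim d1 s1 py _ _ hm2 h1.1 h1.2⟩
        · simp only [if_neg hm2]; exact h1
      · simp only [if_neg hh]; exact h1
  · simp only [if_neg hv]
    by_cases hh : py = qy
    · simp only [if_pos hh]
      by_cases hm2 : min px qx + 1 ≤ max px qx - 1
      · simp only [if_pos hm2]
        exact ⟨pvGood_updI s1 py _ _ hm2 h1.1, pvMerge_sim d1 s1 py _ _ hm2 h1.1 h1.2⟩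
      · simp only [if_neg hm2]; exact h1
    · simp only [if_neg hh]; exact h1

theorem pvBY_sim (coords : List (List Int)) (i : Int) (d : PySem.Dict Int (List Int))
    (s : Int → Option (Int × Int)) (h : pvGood s ∧ pvRelB d s) :
    pvGood (pvEdgeY coords i s) ∧ pvRelB (pvBY coords i d) (pvEdgeY coords i s) := by
  simp only [pvBY, pvEdgeY]
  generalize pvPx coords i = px
  generalize pvPy coords i = py
  generalize pvQx coords i = qx
  generalize pvQy coords i = qy
  have h1 : pvGood (pvUpd s px py) ∧ pvRelB (pvMerge d px py py) (pvUpd s px py) :=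
    ⟨pvGood_upd s px py h.1, pvUpdI_self s px py ▸ pvMerge_sim d s px py py le_rfl h.1 h.2⟩
  generalize hgen1 : pvUpd s px py = s1 at h1
  generalize hgen2 : pvMerge d px py py = d1 at h1
  by_cases hv : px = qx
  · simp only [if_pos hv]
    by_cases hm : min py qy + 1 ≤ max py qy - 1
    · simp only [if_pos hm]
      have h2 : pvGood (pvUpdI s1 px (min py qy + 1) (max py qy - 1)) ∧
          pvRelB (pvMerge d1 px (min py qy + 1) (max py qy - 1)) (pvUpdI s1 px (min py qy + 1) (max py qy - 1)) :=
        ⟨pvGood_updI s1 px _ _ hm h1.1, pvMerge_sim d1 s1 px _ _ hm h1.1 h1.2⟩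
      generalize hgen3 : pvUpdI s1 px (min py qy + 1) (max py qy - 1) = s2 at h2
      generalize hgen4 : pvMerge d1 px (min py qy + 1) (max py qy - 1) = d2 at h2
      by_cases hh : py = qy
      · simp only [if_pos hh]
        by_cases hm2 : min px qx + 1 ≤ max px qx - 1
        · simp only [if_pos hm2]
          exact pvRel_foldl (fun d s => pvGood s ∧ pvRelB d s)
            (fun d x => pvMerge d x py py) (fun s x => pvUpd s x py)
            (fun d s x hh => ⟨pvGood_upd s x py hh.1, pvMerge_sim d s x py py le_rfl hh.1 hh.2⟩)
            _ d2 s2 h2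
        · simp only [if_neg hm2]; exact h2
      · simp only [if_neg hh]; exact h2
    · simp only [if_neg hm]
      by_cases hh : py = qy
      · simp only [if_pos hh]
        by_cases hm2 : min px qx + 1 ≤ max px qx - 1
        · simp only [if_pos hm2]
          exact pvRel_foldl (fun d s => pvGood s ∧ pvRelB d s)
            (fun d x => pvMerge d x py py) (fun s x => pvUpd s x py)
            (fun d s x hh => ⟨pvGood_upd s x py hh.1, pvMerge_sim d s x py py le_rfl hh.1 hh.2⟩)
            _ d1 s1 h1
        · simp only [if_neg hm2]; exact h1
      · simp only [if_neg hh]; exact h1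
  · simp only [if_neg hv]
    by_cases hh : py = qy
    · simp only [if_pos hh]
      by_cases hm2 : min px qx + 1 ≤ max px qx - 1
      · simp only [if_pos hm2]
        exact pvRel_foldl (fun d s => pvGood s ∧ pvRelB d s)
          (fun d x => pvMerge d x py py) (fun s x => pvUpd s x py)
          (fun d s x hh => ⟨pvGood_upd s x py hh.1, pvMerge_sim d s x py py le_rfl hh.1 hh.2⟩)
          _ d1 s1 h1
      · simp only [if_neg hm2]; exact h1
    · simp only [if_neg hh]; exact h1

-- A's per-iteration contribution to all_points, as raw lists
def pvSegL (coords : List (List Int)) (i : Int) : List (List Int) :=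
  PySem.List.pyGetD coords (i - 1) [] ::
  ((if pvPx coords i = pvQx coords i then
      (PySem.List.pyRange 1 ((pvPy coords i - pvQy coords i).natAbs : Int) 1).map (fun j =>
        if pvPy coords i > pvQy coords i then [pvQx coords i, pvPy coords i - j]
        else [pvQx coords i, pvPy coords i + j])
    else []) ++
   (if pvPy coords i = pvQy coords i then
      (PySem.List.pyRange 1 ((pvPx coords i - pvQx coords i).natAbs : Int) 1).map (fun j =>
        if pvPx coords i > pvQx coords i then [pvPx coords i - j, pvQy coords i]
        else [pvPx coords i + j, pvQy coords i])
    else []))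

theorem pvAllPoints_eq_flatMap (coords : List (List Int)) :
    pvAllPoints coords = (PySem.List.pyRange 0 (coords.length : Int) 1).flatMap (pvSegL coords) := by
  rw [pvAllPoints]
  have hstep : (fun (acc : List (List Int)) (i : Int) =>
      let p := PySem.List.pyGetD coords (i - 1) []
      let q := PySem.List.pyGetD coords i []
      let acc := acc ++ [p]
      let acc :=
        if PySem.List.pyGetD p 0 0 = PySem.List.pyGetD q 0 0 then
          (PySem.List.pyRange 1 ((PySem.List.pyGetD p 1 0 - PySem.List.pyGetD q 1 0).natAbs : Int) 1).foldl
            (fun acc j =>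
              if PySem.List.pyGetD p 1 0 > PySem.List.pyGetD q 1 0 then
                acc ++ [[PySem.List.pyGetD q 0 0, PySem.List.pyGetD p 1 0 - j]]
              else
                acc ++ [[PySem.List.pyGetD q 0 0, PySem.List.pyGetD p 1 0 + j]]) acc
        else acc
      if PySem.List.pyGetD p 1 0 = PySem.List.pyGetD q 1 0 then
        (PySem.List.pyRange 1 ((PySem.List.pyGetD p 0 0 - PySem.List.pyGetD q 0 0).natAbs : Int) 1).foldl
          (fun acc j =>
            if PySem.List.pyGetD p 0 0 > PySem.List.pyGetD q 0 0 then
              acc ++ [[PySem.List.pyGetD p 0 0 - j, PySem.List.pyGetD q 1 0]]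
            else
              acc ++ [[PySem.List.pyGetD p 0 0 + j, PySem.List.pyGetD q 1 0]]) acc
      else acc) = fun acc i => acc ++ pvSegL coords i := by
    funext acc i
    have inner : ∀ (c : Prop) (_ : Decidable c) (u v : Int → List Int) (acc0 : List (List Int)) (l : List Int),
        l.foldl (fun acc j => if c then acc ++ [u j] else acc ++ [v j]) acc0 =
          acc0 ++ l.map (fun j => if c then u j else v j) := by
      intro c inst u v acc0 l
      by_cases hc : c
      · simp only [if_pos hc, PySem.List.foldl_append_singleton_eq_map]
      · simp only [if_neg hc, PySem.List.foldl_append_singleton_eq_map]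
    simp only [pvSegL, pvPx, pvPy, pvQx, pvQy, inner]
    by_cases h1 : PySem.List.pyGetD (PySem.List.pyGetD coords (i - 1) []) 0 0 =
        PySem.List.pyGetD (PySem.List.pyGetD coords i []) 0 0 <;>
      by_cases h2 : PySem.List.pyGetD (PySem.List.pyGetD coords (i - 1) []) 1 0 =
        PySem.List.pyGetD (PySem.List.pyGetD coords i []) 1 0 <;>
      simp [h1, h2, List.append_assoc]
  rw [hstep, PySem.List.foldl_append_eq_flatMap]
  rfl

theorem pvSegL_map (coords : List (List Int)) (i : Int) :
    (pvSegL coords i).map (fun l => (PySem.List.pyGetD l 0 0, PySem.List.pyGetD l 1 0)) =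
      pvSegPts coords i := by
  simp only [pvSegL, pvSegPts, List.map_cons, List.map_append, apply_ite
    (List.map (fun l => (PySem.List.pyGetD l 0 0, PySem.List.pyGetD l 1 0))), List.map_map]
  refine congrArg₂ List.cons rfl (congrArg₂ (· ++ ·) ?_ ?_)
  · by_cases hv : pvPx coords i = pvQx coords i
    · simp only [if_pos hv]
      rw [List.map_map]
      refine List.map_congr_left fun j _ => ?_
      by_cases hd : pvPy coords i > pvQy coords i <;> simp only [hd, Function.comp_apply,
        ite_true, ite_false, if_true, if_false] <;> rfl
    · simp only [if_neg hv]; rfl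
  · by_cases hh : pvPy coords i = pvQy coords i
    · simp only [if_pos hh]
      rw [List.map_map]
      refine List.map_congr_left fun j _ => ?_
      by_cases hd : pvPx coords i > pvQx coords i <;> simp only [hd, Function.comp_apply,
        ite_true, ite_false, if_true, if_false] <;> rfl
    · simp only [if_neg hh]; rfl

-- abstract point stream and its min/max states
def pvPts (coords : List (List Int)) : List (Int × Int) :=
  (PySem.List.pyRange 0 (coords.length : Int) 1).flatMap (pvSegPts coords)

def pvSX (coords : List (List Int)) : Int → Option (Int × Int) :=
  (pvPts coords).foldl (fun s p => pvUpd s p.2 p.1) (fun _ => none)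

def pvSY (coords : List (List Int)) : Int → Option (Int × Int) :=
  (pvPts coords).foldl (fun s p => pvUpd s p.1 p.2) (fun _ => none)

theorem pvInitA : pvGood (fun _ => none) ∧ pvRelA PySem.Dict.empty (fun _ => none) :=
  ⟨fun _ p h => by simp at h,
   ⟨PySem.Dict.nodup_keys_empty, fun k => by rw [PySem.Dict.get?_empty]; rfl⟩⟩

theorem pvInitB : pvGood (fun _ => none) ∧ pvRelB PySem.Dict.empty (fun _ => none) :=
  ⟨fun _ p h => by simp at h,
   ⟨PySem.Dict.nodup_keys_empty, fun k => by rw [PySem.Dict.get?_empty]; rfl⟩⟩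

theorem pvMap_allPoints (coords : List (List Int)) :
    (pvAllPoints coords).map (fun l => (PySem.List.pyGetD l 0 0, PySem.List.pyGetD l 1 0)) =
      pvPts coords := by
  rw [pvAllPoints_eq_flatMap, List.map_flatMap, pvPts]
  simp only [pvSegL_map]

theorem pvA_relx (coords : List (List Int)) :
    pvGood (pvSX coords) ∧
      pvRelA ((pvAllPoints coords).foldl
          (fun d point => pvAStep d (PySem.List.pyGetD point 1 0) (PySem.List.pyGetD point 0 0))
          PySem.Dict.empty) (pvSX coords) := by
  have h := pvRel_foldl (fun d s => pvGood s ∧ pvRelA d s)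
    (fun d (p : Int × Int) => pvAStep d p.2 p.1) (fun s p => pvUpd s p.2 p.1)
    (fun d s p hh => ⟨pvGood_upd s p.2 p.1 hh.1, pvAStep_sim d s p.2 p.1 hh.1 hh.2⟩)
    (pvPts coords) PySem.Dict.empty (fun _ => none) pvInitA
  refine ⟨h.1, ?_⟩
  have e : (pvAllPoints coords).foldl
      (fun d point => pvAStep d (PySem.List.pyGetD point 1 0) (PySem.List.pyGetD point 0 0))
      PySem.Dict.empty =
      (pvPts coords).foldl (fun d (p : Int × Int) => pvAStep d p.2 p.1) PySem.Dict.empty := by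
    rw [← pvMap_allPoints, List.foldl_map]
  rw [e]
  exact h.2

theorem pvA_rely (coords : List (List Int)) :
    pvGood (pvSY coords) ∧
      pvRelA ((pvAllPoints coords).foldl
          (fun d point => pvAStep d (PySem.List.pyGetD point 0 0) (PySem.List.pyGetD point 1 0))
          PySem.Dict.empty) (pvSY coords) := by
  have h := pvRel_foldl (fun d s => pvGood s ∧ pvRelA d s)
    (fun d (p : Int × Int) => pvAStep d p.1 p.2) (fun s p => pvUpd s p.1 p.2)
    (fun d s p hh => ⟨pvGood_upd s p.1 p.2 hh.1, pvAStep_sim d s p.1 p.2 hh.1 hh.2⟩)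
    (pvPts coords) PySem.Dict.empty (fun _ => none) pvInitA
  refine ⟨h.1, ?_⟩
  have e : (pvAllPoints coords).foldl
      (fun d point => pvAStep d (PySem.List.pyGetD point 0 0) (PySem.List.pyGetD point 1 0))
      PySem.Dict.empty =
      (pvPts coords).foldl (fun d (p : Int × Int) => pvAStep d p.1 p.2) PySem.Dict.empty := by
    rw [← pvMap_allPoints, List.foldl_map]
  rw [e]
  exact h.2

theorem pvSX_eq (coords : List (List Int)) :
    pvSX coords = (PySem.List.pyRange 0 (coords.length : Int) 1).foldl
      (fun s i => pvEdgeX coords i s) (fun _ => none) := by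
  rw [pvSX, pvPts, List.foldl_flatMap]
  have h : (fun (s : Int → Option (Int × Int)) i =>
      (pvSegPts coords i).foldl (fun s p => pvUpd s p.2 p.1) s) = fun s i => pvEdgeX coords i s :=
    funext fun s => funext fun i => pvSeg_edgeX coords i s
  rw [h]

theorem pvSY_eq (coords : List (List Int)) :
    pvSY coords = (PySem.List.pyRange 0 (coords.length : Int) 1).foldl
      (fun s i => pvEdgeY coords i s) (fun _ => none) := by
  rw [pvSY, pvPts, List.foldl_flatMap]
  have h : (fun (s : Int → Option (Int × Int)) i =>
      (pvSegPts coords i).foldl (fun s p => pvUpd s p.1 p.2) s) = fun s i => pvEdgeY coords i s :=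
    funext fun s => funext fun i => pvSeg_edgeY coords i s
  rw [h]

theorem pvB_relx (coords : List (List Int)) :
    pvGood (pvSX coords) ∧
      pvRelB ((PySem.List.pyRange 0 (coords.length : Int) 1).foldl
          (fun d i => pvBX coords i d) PySem.Dict.empty) (pvSX coords) := by
  rw [pvSX_eq]
  exact pvRel_foldl (fun d s => pvGood s ∧ pvRelB d s)
    (fun d i => pvBX coords i d) (fun s i => pvEdgeX coords i s)
    (fun d s i hh => pvBX_sim coords i d s hh) _ _ _ pvInitB

theorem pvB_rely (coords : List (List Int)) :
    pvGood (pvSY coords) ∧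
      pvRelB ((PySem.List.pyRange 0 (coords.length : Int) 1).foldl
          (fun d i => pvBY coords i d) PySem.Dict.empty) (pvSY coords) := by
  rw [pvSY_eq]
  exact pvRel_foldl (fun d s => pvGood s ∧ pvRelB d s)
    (fun d i => pvBY coords i d) (fun s i => pvEdgeY coords i s)
    (fun d s i hh => pvBY_sim coords i d s hh) _ _ _ pvInitB

-- equal lookups and key sets force equal rendered outputs
theorem pvOut_eq (dA : PySem.Dict Int (PySem.Dict String Int)) (dB : PySem.Dict Int (List Int))
    (s : Int → Option (Int × Int)) (hA : pvRelA dA s) (hB : pvRelB dB s) :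
    (PySem.List.sorted dA.keys (fun k => k) false).map
        (fun k => (k, (dA.getD k PySem.Dict.empty).items)) = pvFmt dB := by
  have hnA : ∀ k, k ∉ dA.keys ↔ s k = none := fun k => by
    rw [← PySem.Dict.get?_eq_none_iff_not_mem_keys, hA.2 k, Option.map_eq_none_iff]
  have hnB : ∀ k, k ∉ dB.keys ↔ s k = none := fun k => by
    rw [← PySem.Dict.get?_eq_none_iff_not_mem_keys, hB.2 k, Option.map_eq_none_iff]
  have hperm : dA.keys.Perm dB.keys := (List.perm_ext_iff_of_nodup hA.1 hB.1).mpr fun k => by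
    rw [← not_iff_not, hnA k, hnB k]
  have hsort := PySem.List.sorted_eq_sorted_of_perm dA.keys dB.keys (fun k => k)
    (fun a b h => h) hperm
  rw [pvFmt, ← hsort]
  refine List.map_congr_left fun k hk => ?_
  have hkmem : k ∈ dA.keys := (PySem.List.mem_sorted _ _ _ _).mp hk
  obtain ⟨p, hp⟩ : ∃ p, s k = some p := by
    cases hsk : s k with
    | none => exact absurd ((hnA k).mpr hsk) (not_not_intro hkmem)
    | some p => exact ⟨p, rfl⟩
  have eA : dA.getD k PySem.Dict.empty = PySem.Dict.mk [("min", p.1), ("max", p.2)] := by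
    rw [PySem.Dict.getD_eq_get?_getD, hA.2 k, hp]; rfl
  have eB : dB.getD k [] = [p.1, p.2] := by
    rw [PySem.Dict.getD_eq_get?_getD, hB.2 k, hp]; rfl
  rw [eA, eB]
  rfl

-- the ports' pair folds split componentwise
theorem pvA_pair (l : List (List Int))
    (a b : PySem.Dict Int (PySem.Dict String Int)) :
    l.foldl (fun bd point =>
        (pvAStep bd.1 (PySem.List.pyGetD point 1 0) (PySem.List.pyGetD point 0 0),
         pvAStep bd.2 (PySem.List.pyGetD point 0 0) (PySem.List.pyGetD point 1 0))) (a, b) =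
      (l.foldl (fun d point => pvAStep d (PySem.List.pyGetD point 1 0) (PySem.List.pyGetD point 0 0)) a,
       l.foldl (fun d point => pvAStep d (PySem.List.pyGetD point 0 0) (PySem.List.pyGetD point 1 0)) b) :=
  pvFoldl_prod l
    (fun d point => pvAStep d (PySem.List.pyGetD point 1 0) (PySem.List.pyGetD point 0 0))
    (fun d point => pvAStep d (PySem.List.pyGetD point 0 0) (PySem.List.pyGetD point 1 0)) a b

theorem pvB_pair (coords : List (List Int)) (l : List Int)
    (a b : PySem.Dict Int (List Int)) :
    l.foldl (fun bd i => (pvBX coords i bd.1, pvBY coords i bd.2)) (a, b) =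
      (l.foldl (fun d i => pvBX coords i d) a, l.foldl (fun d i => pvBY coords i d) b) :=
  pvFoldl_prod l (fun d i => pvBX coords i d) (fun d i => pvBY coords i d) a b

-- ===== VERDICT (by name: the statement is the Claim_ definition above) =====
theorem get_bounds_x_y_spec : Claim_equal_get_bounds_x_y := by
  intro coords _hdom _hpre
  unfold Spec_get_bounds_x_y
  simp only [get_bounds_x_y, get_bounds_x_y_alt]
  have hb : pvBStep coords = fun bd i => (pvBX coords i bd.1, pvBY coords i bd.2) :=
    funext fun bd => funext fun i => pvBStep_eq coords bd i
  rw [hb, pvA_pair, pvB_pair]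
  exact congrArg₂ Prod.mk
    (pvOut_eq _ _ (pvSX coords) (pvA_relx coords).2 (pvB_relx coords).2)
    (pvOut_eq _ _ (pvSY coords) (pvA_rely coords).2 (pvB_rely coords).2)
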